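-- pv_equiv track=rewrite | github.com/zkstewart/Various_scripts | QC/reads/predict_chimeric_amplicons.py | complex_chimera_detection
-- ===== SOURCE A (Python) =====
-- def complex_chimera_detection(voteSmoothed, disallowAmbiguity=False):
--     '''
--     Employs a more complex heuristic upon the smoothed vote list to
--     see if there may be a reference switch occurring in the amplicon sequence
--     at its left and/or right sides.
--
--     This heuristic may fail to discover complex chimerism (e.g., where the middle
--     section is chimeric, but the left and right are the same reference) but, I'm
--     operating under an assumption that that is exceedingly rare.
--
--     Parameters:
--         voteSmoothed -- a list of lists akin to:
--                         [
--                             [1, 0, 0, 0, 0, 0, 0, 0, 0, 1],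
--                             [0, 1, 1, 1, 0, 0, 0, 1, 1, 1],
--                             [1, 1, 1, 1, 1, 1, 1, 1, 1, 0]
--                         ]
--         disallowAmbiguity -- OPTIONAL; a boolean indicating whether to, in situations
--                              where chimerism is ambiguous and a read has no clear breakpoint,
--                              to consider it as a chimera. Default is False, i.e., ambiguous
--                              amplicons will not be considered as chimeras.
--     Returns:
--         isMaybeChimera -- a boolean of True if the amplicon might be chimeric, else False
--     '''
--     # Locate the best vote line
--     voteNums = [ sum(voteSmoothed[i]) for i in range(len(voteSmoothed)) ]
--     bestVote = voteNums.index(max(voteNums)) # it's okay if this has ties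
--
--     # Get the best smoothed vote line
--     bestVoteSmoothed = voteSmoothed[bestVote]
--     otherVoteSmoothed = [ voteSmoothed[i] for i in range(len(voteSmoothed)) if i != bestVote ]
--
--     # If our best vote has no evidence of switching, return it now
--     if not 0 in voteSmoothed[bestVote]:
--         return False
--
--     # Otherwise, see if reference switching at an internal cut line improves the best vote line
--     for cutIndex in range(1, len(bestVoteSmoothed) - 1):
--         bestLeft, bestRight = bestVoteSmoothed[0: cutIndex], bestVoteSmoothed[cutIndex: ]
--         for otherVote in otherVoteSmoothed:
--             otherLeft, otherRight = otherVote[0: cutIndex], otherVote[cutIndex: ]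
--
--             if disallowAmbiguity:
--                 # If the other left is possibly better than the best left
--                 if (0 in bestLeft and bestLeft != otherLeft and sum(otherLeft) >= sum(bestLeft)):
--                     # AND the other right is possibly worse than the best right
--                     "This fulfills our assumption of chimerism"
--                     if (0 in otherRight and bestRight != otherRight and sum(otherRight) <= sum(bestRight)):
--                         return True
--
--                 # Otherwise, if the other right is possibly better than the best right
--                 elif (0 in bestRight and bestRight != otherRight and sum(otherRight) >= sum(bestRight)):
--                     # AND the other left is possibly worse than the best left
--                     "This fulfills our assumption of chimerism"
--                     if (0 in otherLeft and bestLeft != otherLeft and sum(otherLeft) <= sum(bestLeft)):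
--                         return True
--             else:
--                 if sum(otherLeft) > sum(bestLeft) or sum(otherRight) > sum(bestRight):
--                     return True
--
--     # If not, just return False
--     return False
-- ===== SOURCE B (Python) =====
-- def complex_chimera_detection(voteSmoothed, disallowAmbiguity=False):
--     """Same result as the original, computed from per-row prefix sums,
--     prefix zero-counts and common prefix/suffix lengths instead of
--     materialising and re-scanning slices at every cut index."""
--     sums = [sum(row) for row in voteSmoothed]
--     best = sums.index(max(sums))
--     bestRow = voteSmoothed[best]
--     L = len(bestRow)
--     if 0 not in bestRow:
--         return False
--     bps = _scan_sum(bestRow)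
--     bpz = _scan_zero(bestRow)
--     others = voteSmoothed[:best] + voteSmoothed[best + 1:]
--     for row in others:
--         ops = _scan_sum(row)
--         opz = _scan_zero(row)
--         m = len(row)
--         p = _common_prefix(bestRow, row)
--         s = _common_prefix(bestRow[::-1], row[::-1])
--         for c in range(1, L - 1):
--             cl = min(c, m)
--             bl, ol = bps[c], ops[cl]
--             br, orr = bps[L] - bl, ops[m] - ol
--             if disallowAmbiguity:
--                 leftEq = (c <= m and c <= p)
--                 rightEq = (m == L and L - c <= s)
--                 zbl = bpz[c] > 0
--                 zbr = bpz[L] - bpz[c] > 0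
--                 zol = opz[cl] > 0
--                 zor = opz[m] - opz[cl] > 0
--                 if zbl and not leftEq and ol >= bl:
--                     if zor and not rightEq and orr <= br:
--                         return True
--                 elif zbr and not rightEq and orr >= br:
--                     if zol and not leftEq and ol <= bl:
--                         return True
--             else:
--                 if ol > bl or orr > br:
--                     return True
--     return False
--
--
-- def _scan_sum(xs):
--     out = [0]
--     for x in xs:
--         out.append(out[-1] + x)
--     return out
--
--
-- def _scan_zero(xs):
--     out = [0]
--     for x in xs:
--         out.append(out[-1] + (1 if x == 0 else 0))
--     return out
--
--
-- def _common_prefix(a, b):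
--     n = 0
--     for x, y in zip(a, b):
--         if x != y:
--             break
--         n += 1
--     return n
-- ===== Notes on version B (the rewrite author's own statement) =====
-- stated objective: alternative
-- what changed: Instead of materialising and re-scanning four list slices for every cut index, B precomputes per-row prefix sums, prefix zero-counts and the common prefix/suffix lengths with the best row, and answers each cut's sum, 0-membership and slice-equality tests from those tables.
-- outside the precondition, e.g. on complex_chimera_detection([], False): A raises ValueError, B raises ValueError
import Mathlib
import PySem

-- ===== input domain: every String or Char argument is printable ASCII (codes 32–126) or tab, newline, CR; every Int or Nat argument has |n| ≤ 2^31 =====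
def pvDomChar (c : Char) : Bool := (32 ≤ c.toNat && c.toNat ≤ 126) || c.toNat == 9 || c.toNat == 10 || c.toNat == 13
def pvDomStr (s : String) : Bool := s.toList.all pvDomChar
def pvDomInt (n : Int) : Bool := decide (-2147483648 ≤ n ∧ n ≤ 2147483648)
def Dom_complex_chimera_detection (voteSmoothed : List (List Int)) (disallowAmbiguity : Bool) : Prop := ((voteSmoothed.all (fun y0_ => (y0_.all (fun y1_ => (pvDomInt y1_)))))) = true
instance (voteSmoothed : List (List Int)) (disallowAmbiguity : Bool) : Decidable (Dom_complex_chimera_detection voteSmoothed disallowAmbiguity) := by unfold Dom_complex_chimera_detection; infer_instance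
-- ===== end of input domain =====

-- B answers each cut-line check from precomputed per-row prefix sums, prefix zero-counts
-- and common prefix/suffix lengths instead of A's per-cut slice copies (objective: alternative).

-- ===== PORT A =====
-- inner-loop body of A: the `if disallowAmbiguity` branches, acting on the four slices
def pvCheckA (disallowAmbiguity : Bool) (bestLeft bestRight otherLeft otherRight : List Int) : Bool :=
  if disallowAmbiguity then
    if bestLeft.contains 0 && decide (bestLeft ≠ otherLeft) && decide (otherLeft.sum ≥ bestLeft.sum) then
      otherRight.contains 0 && decide (bestRight ≠ otherRight) && decide (otherRight.sum ≤ bestRight.sum)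
    else if bestRight.contains 0 && decide (bestRight ≠ otherRight) && decide (otherRight.sum ≥ bestRight.sum) then
      otherLeft.contains 0 && decide (bestLeft ≠ otherLeft) && decide (otherLeft.sum ≤ bestLeft.sum)
    else false
  else decide (otherLeft.sum > bestLeft.sum) || decide (otherRight.sum > bestRight.sum)

def complex_chimera_detection (voteSmoothed : List (List Int)) (disallowAmbiguity : Bool) : Bool :=
  let voteNums := (PySem.List.pyRange 0 (voteSmoothed.length : Int) 1).map
      (fun i => (PySem.List.pyGetD voteSmoothed i []).sum)
  match PySem.List.max? voteNums (fun x => x) with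
  | none => false  -- empty voteSmoothed: Python raises ValueError here (excluded by Pre_)
  | some mx =>
    let bestVote := (PySem.List.index? voteNums mx).getD 0
    let bestVoteSmoothed := PySem.List.pyGetD voteSmoothed (bestVote : Int) []
    let otherVoteSmoothed := ((PySem.List.pyRange 0 (voteSmoothed.length : Int) 1).filter
        (fun i => decide (i ≠ (bestVote : Int)))).map (fun i => PySem.List.pyGetD voteSmoothed i [])
    if !bestVoteSmoothed.contains 0 then false
    else
      (PySem.List.pyRange 1 ((bestVoteSmoothed.length : Int) - 1) 1).any (fun cutIndex =>
        let bestLeft := PySem.List.slice bestVoteSmoothed (some 0) (some cutIndex)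
        let bestRight := PySem.List.slice bestVoteSmoothed (some cutIndex) none
        otherVoteSmoothed.any (fun otherVote =>
          pvCheckA disallowAmbiguity bestLeft bestRight
            (PySem.List.slice otherVote (some 0) (some cutIndex))
            (PySem.List.slice otherVote (some cutIndex) none)))

-- ===== PORT B =====
-- _scan_sum / _scan_zero / _common_prefix of Source B (the accumulator loops are scanl / structural recursion)
def pvScanSum (xs : List Int) : List Int := List.scanl (· + ·) 0 xs
def pvScanZero (xs : List Int) : List Int :=
  List.scanl (fun a x => a + (if x = 0 then 1 else 0)) 0 xs
def pvCommonPrefix : List Int → List Int → Nat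
  | x :: xs, y :: ys => if x = y then pvCommonPrefix xs ys + 1 else 0
  | _, _ => 0

-- per-cut check of Source B, on the precomputed row statistics
def pvCheckB (disallowAmbiguity : Bool) (bps bpz : List Int) (L : Nat)
    (ops opz : List Int) (m : Nat) (p s : Nat) (c : Nat) : Bool :=
  let cl := min c m
  let bl := bps.getD c 0
  let ol := ops.getD cl 0
  let br := bps.getD L 0 - bl
  let orr := ops.getD m 0 - ol
  if disallowAmbiguity then
    let leftEq := decide (c ≤ m ∧ c ≤ p)
    let rightEq := decide (m = L ∧ L - c ≤ s)
    if decide (0 < bpz.getD c 0) && !leftEq && decide (ol ≥ bl) then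
      decide (0 < opz.getD m 0 - opz.getD cl 0) && !rightEq && decide (orr ≤ br)
    else if decide (0 < bpz.getD L 0 - bpz.getD c 0) && !rightEq && decide (orr ≥ br) then
      decide (0 < opz.getD cl 0) && !leftEq && decide (ol ≤ bl)
    else false
  else decide (ol > bl) || decide (orr > br)

def complex_chimera_detection_alt (voteSmoothed : List (List Int)) (disallowAmbiguity : Bool) : Bool :=
  let sums := voteSmoothed.map (fun row => row.sum)
  match PySem.List.max? sums (fun x => x) with
  | none => false  -- empty voteSmoothed: Python raises ValueError here (excluded by Pre_)
  | some mx =>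
    let best := (PySem.List.index? sums mx).getD 0
    let bestRow := voteSmoothed.getD best []
    let L := bestRow.length
    if !bestRow.contains 0 then false
    else
      let bps := pvScanSum bestRow
      let bpz := pvScanZero bestRow
      (voteSmoothed.take best ++ voteSmoothed.drop (best + 1)).any (fun row =>
        (List.range' 1 (L - 2)).any
          (pvCheckB disallowAmbiguity bps bpz L (pvScanSum row) (pvScanZero row) row.length
            (pvCommonPrefix bestRow row) (pvCommonPrefix bestRow.reverse row.reverse)))

-- ===== PRECONDITION & SPEC =====
-- Pre_ excludes only the empty outer list, on which Python A (and B alike) raises ValueError via max([]).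
def Pre_complex_chimera_detection (voteSmoothed : List (List Int)) (disallowAmbiguity : Bool) : Prop :=
  voteSmoothed ≠ []
instance (voteSmoothed : List (List Int)) (disallowAmbiguity : Bool) : Decidable (Pre_complex_chimera_detection voteSmoothed disallowAmbiguity) := by unfold Pre_complex_chimera_detection; infer_instance
def pvWitness_complex_chimera_detection : List (List Int) × Bool := ([[1, 0], [0, 1]], false)

def Spec_complex_chimera_detection (voteSmoothed : List (List Int)) (disallowAmbiguity : Bool) (out : Bool) : Prop := out = complex_chimera_detection_alt voteSmoothed disallowAmbiguity
instance (voteSmoothed : List (List Int)) (disallowAmbiguity : Bool) (out : Bool) : Decidable (Spec_complex_chimera_detection voteSmoothed disallowAmbiguity out) := by unfold Spec_complex_chimera_detection; infer_instance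

-- ===== CLAIM (what is proved, stated in full; the proofs are below) =====
def Claim_equal_complex_chimera_detection : Prop := ∀ (voteSmoothed : List (List Int)) (disallowAmbiguity : Bool), Dom_complex_chimera_detection voteSmoothed disallowAmbiguity → Pre_complex_chimera_detection voteSmoothed disallowAmbiguity → Spec_complex_chimera_detection voteSmoothed disallowAmbiguity (complex_chimera_detection voteSmoothed disallowAmbiguity)

-- ===== LEMMAS AND PROOFS =====

-- prefix-scan of (+) indexed at n is the sum of the first n elements
theorem pvScanlAdd_getD (xs : List Int) (init : Int) (n : Nat) (h : n ≤ xs.length) :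
    (List.scanl (· + ·) init xs).getD n 0 = init + (xs.take n).sum := by
  induction xs generalizing init n with
  | nil => simp at h; subst h; simp
  | cons x t ih =>
    cases n with
    | zero => simp
    | succ n =>
      rw [List.scanl_cons, List.getD_cons_succ, List.take_succ_cons, List.sum_cons]
      rw [ih (init + x) n (by simpa using h)]; ring

theorem pvScanSum_getD (xs : List Int) (n : Nat) (h : n ≤ xs.length) :
    (pvScanSum xs).getD n 0 = (xs.take n).sum := by
  rw [pvScanSum, pvScanlAdd_getD xs 0 n h, zero_add]

-- prefix-scan of the 0-indicator indexed at n counts the zeros among the first n elements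
theorem pvScanlZero_getD (xs : List Int) (init : Int) (n : Nat) (h : n ≤ xs.length) :
    (List.scanl (fun a x => a + (if x = 0 then 1 else 0)) init xs).getD n 0
      = init + ((xs.take n).count 0 : Int) := by
  induction xs generalizing init n with
  | nil => simp at h; subst h; simp
  | cons x t ih =>
    cases n with
    | zero => simp
    | succ n =>
      rw [List.scanl_cons, List.getD_cons_succ, List.take_succ_cons]
      rw [ih _ n (by simpa using h), List.count_cons]
      by_cases hx : x = 0 <;> simp [hx] <;> push_cast <;> ring

theorem pvScanZero_getD (xs : List Int) (n : Nat) (h : n ≤ xs.length) :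
    (pvScanZero xs).getD n 0 = ((xs.take n).count 0 : Int) := by
  rw [pvScanZero, pvScanlZero_getD xs 0 n h, zero_add]

-- prefix equality at a cut, characterised by the first-divergence count
theorem pvCommonPrefix_take_eq (b o : List Int) (c : Nat) (hc : c ≤ b.length) :
    b.take c = o.take c ↔ c ≤ o.length ∧ c ≤ pvCommonPrefix b o := by
  induction b generalizing o c with
  | nil => simp at hc; subst hc; simp
  | cons x bs ih =>
    cases c with
    | zero => simp
    | succ c =>
      cases o with
      | nil => simp [pvCommonPrefix]
      | cons y os =>
        simp only [List.take_succ_cons, List.cons.injEq, List.length_cons, pvCommonPrefix]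
        by_cases hxy : x = y
        · rw [ih os c (by simpa using hc)]
          simp [hxy]
        · simp [hxy]

-- suffix equality at a cut, via the first divergence of the reversed lists
theorem pvCommonSuffix_drop_eq (b o : List Int) (c : Nat) (hc : c < b.length) :
    b.drop c = o.drop c ↔ o.length = b.length ∧ b.length - c ≤ pvCommonPrefix b.reverse o.reverse := by
  constructor
  · intro h
    have hlen : b.length - c = o.length - c := by
      rw [← List.length_drop (l := b), h, List.length_drop]
    have hol : o.length = b.length := by omega
    refine ⟨hol, ?_⟩
    have hrev := congrArg List.reverse h
    rw [List.reverse_drop, List.reverse_drop, hol] at hrev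
    exact ((pvCommonPrefix_take_eq b.reverse o.reverse (b.length - c) (by simp)).mp hrev).2
  · rintro ⟨hol, hs⟩
    have ht : b.reverse.take (b.length - c) = o.reverse.take (b.length - c) :=
      (pvCommonPrefix_take_eq b.reverse o.reverse (b.length - c) (by simp)).mpr
        ⟨by simp [hol], hs⟩
    have hrev : (b.drop c).reverse = (o.drop c).reverse := by
      rw [List.reverse_drop, List.reverse_drop, hol]; exact ht
    simpa using congrArg List.reverse hrev

-- A's vote-sum comprehension is the plain map B computes
theorem pvVoteNums_eq (vs : List (List Int)) :
    ((PySem.List.pyRange 0 (vs.length : Int) 1).map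
      (fun i => (PySem.List.pyGetD vs i ([] : List Int)).sum)) = vs.map (fun row => row.sum) := by
  have h : (fun i => (PySem.List.pyGetD vs i ([] : List Int)).sum)
      = (fun row : List Int => row.sum) ∘ (fun i => PySem.List.pyGetD vs i []) := rfl
  rw [h, ← List.map_map, PySem.List.map_pyGetD_pyRange_zero']

-- reading a list back off by its indices
theorem pvGetDRange (t : List (List Int)) :
    (List.range t.length).map (fun i => t.getD i ([] : List Int)) = t := by
  apply List.ext_getElem (by simp)
  intro i h1 h2
  simp [List.getElem?_eq_getElem h2]

-- "all indices except b", read off, is take b ++ drop (b+1)   (Nat-index form)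
theorem pvNatOthers (vs : List (List Int)) (b : Nat) (hb : b < vs.length) :
    ((List.range vs.length).filter (fun i => decide (i ≠ b))).map (fun i => vs.getD i ([] : List Int))
      = vs.take b ++ vs.drop (b + 1) := by
  induction vs generalizing b with
  | nil => simp at hb
  | cons v t ih =>
    rw [List.length_cons, List.range_succ_eq_map, List.filter_cons]
    cases b with
    | zero =>
      rw [if_neg (by simp), List.filter_map, List.map_map]
      rw [List.filter_congr (q := fun _ => true) (by intro a _; simp)]
      rw [List.filter_true]
      rw [List.map_congr_left (f := (fun i => (v :: t).getD i ([] : List Int)) ∘ Nat.succ)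
        (g := fun i => t.getD i ([] : List Int)) (by intro a _; simp)]
      rw [pvGetDRange t]
      simp
    | succ b' =>
      rw [if_pos (by simp), List.map_cons, List.filter_map, List.map_map]
      rw [List.filter_congr (q := fun i => decide (i ≠ b')) (by intro a _; simp)]
      rw [List.map_congr_left (f := (fun i => (v :: t).getD i ([] : List Int)) ∘ Nat.succ)
        (g := fun i => t.getD i ([] : List Int)) (by intro a _; simp)]
      rw [ih b' (by simpa using hb)]
      simp

-- A's "all rows except the best index" comprehension is B's take ++ drop
theorem pvOthers_eq (vs : List (List Int)) (b : Nat) (hb : b < vs.length) :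
    ((PySem.List.pyRange 0 (vs.length : Int) 1).filter (fun i => decide (i ≠ (b : Int)))).map
      (fun i => PySem.List.pyGetD vs i []) = vs.take b ++ vs.drop (b + 1) := by
  rw [PySem.List.pyRange_zero_natCast, List.filter_map, List.map_map]
  rw [List.filter_congr (q := fun i : Nat => decide (i ≠ b)) (by intro a _; simp)]
  rw [List.map_congr_left
    (f := (fun i => PySem.List.pyGetD vs i ([] : List Int)) ∘ (fun k : Nat => (k : Int)))
    (g := fun i : Nat => vs.getD i ([] : List Int)) (by intro a _; simp)]
  exact pvNatOthers vs b hb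

-- the two nested early-return loops are existence tests, so they commute
theorem pvAnySwap {α β : Type} (l1 : List α) (l2 : List β) (f : α → β → Bool) :
    (l1.any fun a => l2.any (f a)) = (l2.any fun b => l1.any (fun a => f a b)) := by
  rw [Bool.eq_iff_iff]; simp only [List.any_eq_true]; tauto

-- the per-(cut, row) bodies of the two loops agree at every internal cut
theorem pvCheck_eq (dis : Bool) (br o : List Int) (c : Nat) (h2 : c + 2 ≤ br.length) :
    pvCheckA dis (PySem.List.slice br (some 0) (some (c : Int)))
      (PySem.List.slice br (some (c : Int)) none)
      (PySem.List.slice o (some 0) (some (c : Int)))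
      (PySem.List.slice o (some (c : Int)) none)
    = pvCheckB dis (pvScanSum br) (pvScanZero br) br.length (pvScanSum o) (pvScanZero o) o.length
        (pvCommonPrefix br o) (pvCommonPrefix br.reverse o.reverse) c := by
  rw [PySem.List.slice_zero_start, PySem.List.slice_to_natCast, PySem.List.slice_from_natCast,
    PySem.List.slice_zero_start, PySem.List.slice_to_natCast, PySem.List.slice_from_natCast]
  have htko : o.take c = o.take (min c o.length) := List.take_eq_take_min ..
  have hdro : o.drop c = o.drop (min c o.length) := by
    rcases le_total c o.length with h | h
    · rw [min_eq_left h]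
    · rw [min_eq_right h, List.drop_eq_nil_of_le h, List.drop_eq_nil_of_le le_rfl]
  -- sums via the prefix scans
  have hsum_o : o.sum = (o.take (min c o.length)).sum + (o.drop c).sum := by
    rw [hdro]
    conv_lhs => rw [← List.take_append_drop (min c o.length) o]
    rw [List.sum_append]
  have hbl : (br.take c).sum = (pvScanSum br).getD c 0 := (pvScanSum_getD br c (by omega)).symm
  have hbrs : (br.drop c).sum = (pvScanSum br).getD br.length 0 - (pvScanSum br).getD c 0 := by
    rw [pvScanSum_getD br br.length le_rfl, List.take_length, ← hbl]
    have hsum_br : br.sum = (br.take c).sum + (br.drop c).sum := by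
      conv_lhs => rw [← List.take_append_drop c br]
      rw [List.sum_append]
    linarith
  have hol : (o.take c).sum = (pvScanSum o).getD (min c o.length) 0 := by
    rw [htko, pvScanSum_getD o _ (min_le_right ..)]
  have hos : (o.drop c).sum = (pvScanSum o).getD o.length 0 - (pvScanSum o).getD (min c o.length) 0 := by
    rw [pvScanSum_getD o o.length le_rfl, List.take_length, pvScanSum_getD o _ (min_le_right ..)]
    linarith [hsum_o]
  -- 0-membership via the zero-count scans
  have hcnt_br : br.count 0 = (br.take c).count 0 + (br.drop c).count 0 := by
    conv_lhs => rw [← List.take_append_drop c br]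
    rw [List.count_append]
  have hcnt_o : o.count 0 = (o.take (min c o.length)).count 0 + (o.drop c).count 0 := by
    rw [hdro]
    conv_lhs => rw [← List.take_append_drop (min c o.length) o]
    rw [List.count_append]
  have hzbl : (br.take c).contains 0 = decide (0 < (pvScanZero br).getD c 0) := by
    rw [List.contains_eq_mem]
    exact decide_eq_decide.mpr (by
      rw [pvScanZero_getD br c (by omega)]
      simp [List.count_pos_iff])
  have hzbr : (br.drop c).contains 0
      = decide (0 < (pvScanZero br).getD br.length 0 - (pvScanZero br).getD c 0) := by
    rw [List.contains_eq_mem]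
    exact decide_eq_decide.mpr (by
      rw [pvScanZero_getD br br.length le_rfl, List.take_length, pvScanZero_getD br c (by omega)]
      rw [← List.count_pos_iff (a := (0 : Int))]
      omega)
  have hzol : (o.take c).contains 0 = decide (0 < (pvScanZero o).getD (min c o.length) 0) := by
    rw [List.contains_eq_mem]
    exact decide_eq_decide.mpr (by
      rw [pvScanZero_getD o _ (min_le_right ..), htko]
      simp [List.count_pos_iff])
  have hzor : (o.drop c).contains 0
      = decide (0 < (pvScanZero o).getD o.length 0 - (pvScanZero o).getD (min c o.length) 0) := by
    rw [List.contains_eq_mem]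
    exact decide_eq_decide.mpr (by
      rw [pvScanZero_getD o o.length le_rfl, List.take_length, pvScanZero_getD o _ (min_le_right ..)]
      rw [← List.count_pos_iff (a := (0 : Int))]
      omega)
  -- slice equalities via first-divergence counts
  have hleq : decide (br.take c ≠ o.take c)
      = !decide (c ≤ o.length ∧ c ≤ pvCommonPrefix br o) := by
    rw [decide_not]
    congr 1
    exact decide_eq_decide.mpr (pvCommonPrefix_take_eq br o c (by omega))
  have hreq : decide (br.drop c ≠ o.drop c)
      = !decide (o.length = br.length ∧ br.length - c ≤ pvCommonPrefix br.reverse o.reverse) := by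
    rw [decide_not]
    congr 1
    exact decide_eq_decide.mpr (pvCommonSuffix_drop_eq br o c (by omega))
  simp only [pvCheckA, pvCheckB]
  rw [hzbl, hzbr, hzol, hzor, hleq, hreq, hbl, hbrs, hol, hos]

-- the whole programs agree
theorem pvMain (vs : List (List Int)) (dis : Bool) :
    complex_chimera_detection vs dis = complex_chimera_detection_alt vs dis := by
  unfold complex_chimera_detection complex_chimera_detection_alt
  rw [pvVoteNums_eq]
  cases hmx : PySem.List.max? (vs.map fun row => row.sum) (fun x => x) with
  | none => simp only [hmx]
  | some mx =>
    simp only [hmx, PySem.List.pyGetD_natCast]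
    have hmem : mx ∈ vs.map fun row => row.sum := PySem.List.max?_mem hmx
    obtain ⟨k, hk⟩ := Option.isSome_iff_exists.mp ((PySem.List.index?_isSome_iff _ _).mpr hmem)
    have hblt : (PySem.List.index? (vs.map fun row => row.sum) mx).getD 0 < vs.length := by
      obtain ⟨hklt, -, -⟩ := PySem.List.getElem_of_index?_eq_some hk
      rw [hk]
      simpa using hklt
    set b := (PySem.List.index? (vs.map fun row => row.sum) mx).getD 0 with hbdef
    set br := vs.getD b ([] : List Int) with hbrdef
    by_cases h0 : br.contains 0
    · rw [if_neg (by simpa using h0), if_neg (by simpa using h0)]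
      rw [pvOthers_eq vs b hblt, pvAnySwap]
      apply PySem.List.any_congr_mem
      intro o _
      have hcuts : PySem.List.pyRange 1 ((br.length : Int) - 1)
          = (List.range (br.length - 2)).map (fun k : Nat => (1 : Int) + (k : Int)) := by
        have hn : (((br.length : Int) - 1) - 1).toNat = br.length - 2 := by omega
        rw [PySem.List.pyRange_one, hn]
      rw [hcuts, List.range'_eq_map_range, List.any_map, List.any_map]
      apply PySem.List.any_congr_mem
      intro k hkmem
      have hklt : k < br.length - 2 := List.mem_range.mp hkmem
      have hcast : ((1 : Int) + k) = ((1 + k : Nat) : Int) := by push_cast; ring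
      simp only [Function.comp]
      rw [hcast]
      exact pvCheck_eq dis br o (1 + k) (by omega)
    · rw [if_pos (by simpa using h0), if_pos (by simpa using h0)]

-- ===== VERDICT (by name: the statement is the Claim_ definition above) =====
theorem complex_chimera_detection_spec : Claim_equal_complex_chimera_detection := by
  intro vs dis _ _
  unfold Spec_complex_chimera_detection
  exact pvMain vs dis
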